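-- pv_equiv track=rewrite | github.com/guilherme-luiz-cella/Python-Image-Processing- | matrix_functions.py | logical_xor
-- ===== SOURCE A (Python) =====
-- def get_matrix_dimensions(matrix):
--     """
--     Get dimensions of the matrix
--
--     Args:
--         matrix: Python list matrix
--
--     Returns:
--         tuple: (height, width)
--     """
--     height = len(matrix)
--     width = len(matrix[0]) if matrix else 0
--     return height, width
--
-- def logical_xor(matrix1, matrix2):
--     """
--     Logical XOR operation on two binary images
--
--     Args:
--         matrix1: First binary image matrix
--         matrix2: Second binary image matrix
--
--     Returns:
--         list: Result matrix or None if incompatible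
--     """
--     height1, width1 = get_matrix_dimensions(matrix1)
--     height2, width2 = get_matrix_dimensions(matrix2)
--
--     if height1 != height2 or width1 != width2:
--         return None
--
--     result_matrix = []
--     for y in range(height1):
--         new_row = []
--         for x in range(width1):
--             pixel1 = 255 if matrix1[y][x] > 127 else 0
--             pixel2 = 255 if matrix2[y][x] > 127 else 0
--             result = 255 if (pixel1 == 255) != (pixel2 == 255) else 0
--             new_row.append(result)
--         result_matrix.append(new_row)
--
--     return result_matrix
-- ===== SOURCE B (Python) =====
-- def get_matrix_dimensions(matrix):
--     height = len(matrix)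
--     width = len(matrix[0]) if matrix else 0
--     return height, width
--
--
-- def logical_xor(matrix1, matrix2):
--     h1, w1 = get_matrix_dimensions(matrix1)
--     if (h1, w1) != get_matrix_dimensions(matrix2):
--         return None
--     flat1 = [p for row in matrix1 for p in row]
--     flat2 = [p for row in matrix2 for p in row]
--     flat = [255 * ((a > 127) ^ (b > 127)) for a, b in zip(flat1, flat2)]
--     return [flat[i * w1:(i + 1) * w1] for i in range(h1)]
-- ===== Notes on version B (the rewrite author's own statement) =====
-- stated objective: alternative
-- what changed: Replaces A's fused nested index loop over (y,x) by a flatten/zip/re-chunk pipeline: both matrices are flattened to flat lists, one linear pass computes 255*((a>127)^(b>127)) over the zipped flats, and the result rows are recovered by slicing the flat output at multiples of the width; Pre_ excludes ragged matrices whose declared dimensions match, where A indexes every row by the first row's width (raising IndexError on shorter rows, truncating longer ones) while B's flat offsets shift.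
import Mathlib
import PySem

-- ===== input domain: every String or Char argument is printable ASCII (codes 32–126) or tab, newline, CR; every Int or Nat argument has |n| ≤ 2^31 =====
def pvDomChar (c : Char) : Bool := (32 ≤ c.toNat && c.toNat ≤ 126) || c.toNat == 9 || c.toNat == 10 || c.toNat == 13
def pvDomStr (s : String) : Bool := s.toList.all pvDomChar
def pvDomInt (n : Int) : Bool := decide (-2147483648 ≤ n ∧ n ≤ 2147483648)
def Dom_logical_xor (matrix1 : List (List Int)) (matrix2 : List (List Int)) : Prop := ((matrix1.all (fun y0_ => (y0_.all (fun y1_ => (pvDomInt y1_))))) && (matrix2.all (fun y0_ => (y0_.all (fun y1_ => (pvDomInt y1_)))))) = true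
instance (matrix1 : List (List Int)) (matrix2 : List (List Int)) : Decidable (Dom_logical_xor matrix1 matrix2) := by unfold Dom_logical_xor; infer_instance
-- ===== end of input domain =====

-- B replaces A's fused nested index loop by a flatten / single linear xor pass / slice-based
-- re-chunk pipeline (different decomposition, same cost); equivalence is about the return value.

-- ===== PORT A =====
def get_matrix_dimensions (matrix : List (List Int)) : Int × Int :=
  (PySem.List.len matrix,
   if matrix ≠ [] then PySem.List.len (matrix.headD []) else 0)

def logical_xor (matrix1 : List (List Int)) (matrix2 : List (List Int)) : Option (List (List Int)) :=
  let d1 := get_matrix_dimensions matrix1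
  let d2 := get_matrix_dimensions matrix2
  if d1.1 ≠ d2.1 ∨ d1.2 ≠ d2.2 then none
  else
    some ((PySem.List.pyRange 0 d1.1 1).map (fun y =>
      (PySem.List.pyRange 0 d1.2 1).map (fun x =>
        let pixel1 : Int := if PySem.List.pyGetD (PySem.List.pyGetD matrix1 y []) x 0 > 127 then 255 else 0
        let pixel2 : Int := if PySem.List.pyGetD (PySem.List.pyGetD matrix2 y []) x 0 > 127 then 255 else 0
        if (pixel1 == 255) != (pixel2 == 255) then (255 : Int) else 0)))

-- ===== PORT B =====
def logical_xor_alt (matrix1 : List (List Int)) (matrix2 : List (List Int)) : Option (List (List Int)) :=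
  let d1 := get_matrix_dimensions matrix1
  if (d1.1, d1.2) ≠ get_matrix_dimensions matrix2 then none
  else
    let flat1 := matrix1.flatMap id
    let flat2 := matrix2.flatMap id
    let flat := (flat1.zip flat2).map (fun ab =>
      (255 : Int) * (if Bool.xor (decide (ab.1 > 127)) (decide (ab.2 > 127)) then 1 else 0))
    some ((PySem.List.pyRange 0 d1.1 1).map (fun i =>
      PySem.List.slice flat (some (i * d1.2)) (some ((i + 1) * d1.2))))

-- ===== PRECONDITION & SPEC =====
-- Pre_ excludes ragged matrices whose declared dimensions (height, first-row width) match: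
-- there A indexes every row by the first row's width (raising IndexError on shorter rows,
-- truncating longer ones) while B's flat offsets shift.
def Pre_logical_xor (matrix1 : List (List Int)) (matrix2 : List (List Int)) : Prop :=
  (matrix1.length ≠ matrix2.length ∨ (matrix1.headD []).length ≠ (matrix2.headD []).length) ∨
  ((∀ r ∈ matrix1, r.length = (matrix1.headD []).length) ∧
   (∀ r ∈ matrix2, r.length = (matrix1.headD []).length))
instance (matrix1 : List (List Int)) (matrix2 : List (List Int)) : Decidable (Pre_logical_xor matrix1 matrix2) := by unfold Pre_logical_xor; infer_instance

def pvWitness_logical_xor : List (List Int) × List (List Int) := ([[200, 3], [0, 128]], [[10, 255], [60, 90]])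

def Spec_logical_xor (matrix1 : List (List Int)) (matrix2 : List (List Int)) (out : Option (List (List Int))) : Prop := out = logical_xor_alt matrix1 matrix2
instance (matrix1 : List (List Int)) (matrix2 : List (List Int)) (out : Option (List (List Int))) : Decidable (Spec_logical_xor matrix1 matrix2 out) := by unfold Spec_logical_xor; infer_instance

-- ===== CLAIM (what is proved, stated in full; the proofs are below) =====
def Claim_equal_logical_xor : Prop := ∀ (matrix1 : List (List Int)) (matrix2 : List (List Int)), Dom_logical_xor matrix1 matrix2 → Pre_logical_xor matrix1 matrix2 → Spec_logical_xor matrix1 matrix2 (logical_xor matrix1 matrix2)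

-- ===== LEMMAS AND PROOFS =====

-- the common—row-wise zipped—form both sides are reduced to
def pvCell (ab : Int × Int) : Int :=
  (255 : Int) * (if Bool.xor (decide (ab.1 > 127)) (decide (ab.2 > 127)) then 1 else 0)

def pvZipForm (m1 m2 : List (List Int)) : List (List Int) :=
  (m1.zip m2).map (fun p => (p.1.zip p.2).map pvCell)

-- A's thresholded-xor cell equals B's arithmetic-xor cell.
theorem cell_eq (a b : Int) :
    (if ((if a > 127 then (255:Int) else 0) == 255) != ((if b > 127 then (255:Int) else 0) == 255)
     then (255:Int) else 0)
    = pvCell (a, b) := by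
  by_cases ha : a > 127 <;> by_cases hb : b > 127 <;> simp [pvCell, ha, hb]

-- An index loop over two equally long lists is the zip of the lists.
theorem mapRange_eq_zipMap {α β : Type} (d : α) (f : α → α → β) (l1 l2 : List α)
    (h : l1.length = l2.length) :
    (PySem.List.pyRange 0 (l1.length : Int) 1).map
      (fun i => f (PySem.List.pyGetD l1 i d) (PySem.List.pyGetD l2 i d))
    = (l1.zip l2).map (fun p => f p.1 p.2) := by
  apply List.ext_getElem
  · simp [PySem.List.length_pyRange_one, h]
  · intro k hk1 hk2
    simp only [PySem.List.length_pyRange_one, List.length_map] at hk1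
    have hk : k < l1.length := by omega
    rw [List.getElem_map, List.getElem_map, PySem.List.getElem_pyRange_one]
    have h0 : ((0 : Int) + (k : Int)) = (k : Int) := by ring
    rw [h0, PySem.List.pyGetD_natCast, PySem.List.pyGetD_natCast, List.getElem_zip]
    simp [List.getD_eq_getElem?_getD, List.getElem?_eq_getElem hk,
      List.getElem?_eq_getElem (by omega : k < l2.length)]

-- zip of flattens is the flatten of the row-wise zips, for matrices with equal row lengths.
theorem zip_flatMap (m1 m2 : List (List Int)) (w : Nat)
    (h : m1.length = m2.length)
    (h1 : ∀ r ∈ m1, r.length = w) (h2 : ∀ r ∈ m2, r.length = w) :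
    (m1.flatMap id).zip (m2.flatMap id)
    = ((m1.zip m2).map (fun p => p.1.zip p.2)).flatten := by
  induction m1 generalizing m2 with
  | nil => simp
  | cons r t ih =>
    cases m2 with
    | nil => simp at h
    | cons r2 t2 =>
      simp only [List.flatMap_cons, id_eq, List.zip_cons_cons, List.map_cons, List.flatten_cons]
      rw [List.zip_append (by rw [h1 r (by simp), h2 r2 (by simp)])]
      congr 1
      exact ih t2 (by simpa using h) (fun r hr => h1 r (by simp [hr]))
        (fun r hr => h2 r (by simp [hr]))

-- slicing a flatten of uniform-width rows at row boundaries recovers the rows.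
theorem slice_flatten (L : List (List Int)) (w : Nat) (hw : ∀ r ∈ L, r.length = w)
    (k : Nat) (hk : k < L.length) :
    PySem.List.slice L.flatten (some ((k * w : Nat) : Int)) (some (((k + 1) * w : Nat) : Int))
    = L[k] := by
  induction L generalizing k with
  | nil => simp at hk
  | cons r t ih =>
    have hwsub : ∀ j : Nat, (j + 1) * w - j * w = w := by
      intro j; rw [Nat.succ_mul]; omega
    rw [PySem.List.slice_natCast, hwsub k]
    cases k with
    | zero =>
      simp only [Nat.zero_mul, List.drop_zero, List.flatten_cons, List.getElem_cons_zero]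
      exact List.take_left' (hw r (by simp))
    | succ k =>
      have hr : r.length = w := hw r (by simp)
      have hstep : (k + 1) * w = r.length + k * w := by rw [hr]; ring
      rw [List.flatten_cons, hstep, List.drop_length_add_append, List.getElem_cons_succ]
      have := ih (fun r hr => hw r (by simp [hr])) k (by simpa using hk)
      rw [PySem.List.slice_natCast, hwsub k] at this
      exact this

-- B's chunking of the flat pass equals the row-wise zipped form.
theorem bside (m1 m2 : List (List Int)) (w : Nat)
    (h : m1.length = m2.length)
    (h1 : ∀ r ∈ m1, r.length = w) (h2 : ∀ r ∈ m2, r.length = w) :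
    (PySem.List.pyRange 0 (m1.length : Int) 1).map (fun i =>
      PySem.List.slice (((m1.flatMap id).zip (m2.flatMap id)).map pvCell)
        (some (i * (w : Int))) (some ((i + 1) * (w : Int))))
    = pvZipForm m1 m2 := by
  have hflat : ((m1.flatMap id).zip (m2.flatMap id)).map pvCell
      = (pvZipForm m1 m2).flatten := by
    rw [zip_flatMap m1 m2 w h h1 h2, List.map_flatten]
    unfold pvZipForm
    rw [List.map_map]
    rfl
  have hrows : ∀ r ∈ pvZipForm m1 m2, r.length = w := by
    intro r hr
    unfold pvZipForm at hr
    obtain ⟨p, hp, rfl⟩ := List.mem_map.mp hr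
    obtain ⟨hp1, hp2⟩ := List.of_mem_zip hp
    simp [List.length_zip, h1 _ hp1, h2 _ hp2]
  have hlenZ : (pvZipForm m1 m2).length = m1.length := by
    unfold pvZipForm
    simp [List.length_zip, h]
  apply List.ext_getElem
  · simp [PySem.List.length_pyRange_one, hlenZ]
  · intro k hk1 hk2
    simp only [PySem.List.length_pyRange_one, List.length_map] at hk1
    rw [List.getElem_map, PySem.List.getElem_pyRange_one]
    rw [hflat]
    have hcast1 : ((0 : Int) + (k : Int)) * (w : Int) = ((k * w : Nat) : Int) := by push_cast; ring
    have hcast2 : (((0 : Int) + (k : Int)) + 1) * (w : Int) = (((k + 1) * w : Nat) : Int) := by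
      push_cast; ring
    rw [hcast1, hcast2, slice_flatten (pvZipForm m1 m2) w hrows k (by omega)]

-- A's index-driven nested loop equals the row-wise zipped form.
theorem aside (m1 m2 : List (List Int)) (w : Nat)
    (h : m1.length = m2.length)
    (h1 : ∀ r ∈ m1, r.length = w) (h2 : ∀ r ∈ m2, r.length = w) :
    (PySem.List.pyRange 0 ((m1.length : Nat) : Int) 1).map (fun y =>
      (PySem.List.pyRange 0 ((w : Nat) : Int) 1).map (fun x =>
        let pixel1 : Int := if PySem.List.pyGetD (PySem.List.pyGetD m1 y []) x 0 > 127 then 255 else 0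
        let pixel2 : Int := if PySem.List.pyGetD (PySem.List.pyGetD m2 y []) x 0 > 127 then 255 else 0
        if (pixel1 == 255) != (pixel2 == 255) then (255 : Int) else 0))
    = pvZipForm m1 m2 := by
  rw [mapRange_eq_zipMap ([] : List Int)
        (fun r1 r2 => (PySem.List.pyRange 0 ((w : Nat) : Int) 1).map (fun x =>
          if (((if PySem.List.pyGetD r1 x 0 > 127 then (255:Int) else 0) == 255) !=
              ((if PySem.List.pyGetD r2 x 0 > 127 then (255:Int) else 0) == 255)) = true
          then (255:Int) else 0)) m1 m2 h]
  unfold pvZipForm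
  apply List.map_congr_left
  intro p hp
  obtain ⟨hp1, hp2⟩ := List.of_mem_zip hp
  have hl1 : p.1.length = w := h1 _ hp1
  have hl2 : p.2.length = p.1.length := by rw [hl1]; exact h2 _ hp2
  rw [← hl1, mapRange_eq_zipMap (0 : Int)
        (fun a b => if (((if a > 127 then (255:Int) else 0) == 255) !=
                        ((if b > 127 then (255:Int) else 0) == 255)) = true
                    then (255:Int) else 0) p.1 p.2 hl2.symm]
  apply List.map_congr_left
  intro ab _
  exact cell_eq ab.1 ab.2

-- ===== VERDICT (by name: the statement is the Claim_ definition above) =====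
theorem logical_xor_spec : Claim_equal_logical_xor := by
  intro m1 m2 _ hpre
  unfold Spec_logical_xor logical_xor logical_xor_alt
  by_cases hd : get_matrix_dimensions m1 = get_matrix_dimensions m2
  · have hd1 : (get_matrix_dimensions m1).1 = (get_matrix_dimensions m2).1 := by rw [hd]
    have hd2 : (get_matrix_dimensions m1).2 = (get_matrix_dimensions m2).2 := by rw [hd]
    have hdpair : ((get_matrix_dimensions m1).1, (get_matrix_dimensions m1).2)
        = get_matrix_dimensions m2 := by rw [← hd]
    simp only [hdpair, ne_eq, not_true_eq_false, not_false_eq_true, if_neg]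
    simp only [hd, not_true_eq_false, or_self, not_false_eq_true, if_neg]
    rcases List.eq_nil_or_concat m1 with hm1 | _
    · -- m1 = [] forces m2 = [] via equal heights
      subst hm1
      have hlen : m2.length = 0 := by
        have := hd1
        simp [get_matrix_dimensions, PySem.List.len_eq] at this
        omega
      rw [List.eq_nil_of_length_eq_zero hlen]
      decide
    · -- m1 nonempty: equal heights and widths, all rows of width w
      have hm1ne : m1 ≠ [] := by rename_i h; rcases h with ⟨l, x, rfl⟩; simp
      have hlen : m1.length = m2.length := by
        have := hd1
        simp [get_matrix_dimensions, PySem.List.len_eq] at this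
        exact_mod_cast this
      have hm2ne : m2 ≠ [] := by
        intro h
        apply hm1ne
        rw [← List.length_eq_zero_iff, hlen, h]
        simp
      have hwid : (m1.headD []).length = (m2.headD []).length := by
        have := hd2
        simp [get_matrix_dimensions, hm1ne, hm2ne, PySem.List.len_eq] at this
        rw [List.headD_eq_head?_getD, List.headD_eq_head?_getD]
        exact_mod_cast this
      have hrows : (∀ r ∈ m1, r.length = (m1.headD []).length) ∧
                   (∀ r ∈ m2, r.length = (m1.headD []).length) := by
        rcases hpre with h | h
        · rcases h with h | h
          · exact absurd hlen h
          · exact absurd hwid h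
        · exact h
      have hdim1 : (get_matrix_dimensions m2).1 = ((m1.length : Int)) := by
        rw [← hd]; simp [get_matrix_dimensions, PySem.List.len_eq]
      have hdim2 : (get_matrix_dimensions m2).2 = (((m1.headD []).length : Int)) := by
        rw [← hd]
        simp [get_matrix_dimensions, hm1ne, PySem.List.len_eq, List.headD_eq_head?_getD]
      rw [hdim1, hdim2]
      congr 1
      rw [show (fun ab : Int × Int => (255:Int) * if (decide (ab.1 > 127) ^^ decide (ab.2 > 127)) = true then 1 else 0) = pvCell from rfl]
      rw [aside m1 m2 (m1.headD []).length hlen hrows.1 hrows.2]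
      rw [bside m1 m2 (m1.headD []).length hlen hrows.1 hrows.2]
  · have hA : (get_matrix_dimensions m1).1 ≠ (get_matrix_dimensions m2).1 ∨
           (get_matrix_dimensions m1).2 ≠ (get_matrix_dimensions m2).2 := by
      by_contra h
      rw [not_or, not_not, not_not] at h
      exact hd (Prod.ext h.1 h.2)
    have hB : ((get_matrix_dimensions m1).1, (get_matrix_dimensions m1).2)
        ≠ get_matrix_dimensions m2 := by
      intro h; exact hd (by rw [← h])
    simp [hA, hB]
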